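-- pv_equiv track=rewrite | github.com/wnhirsch/CPD_2018-1 | dicioOK.py | reduce2radical
-- ===== SOURCE A (Python) =====
-- from unicodedata import normalize # Funcao que retorna o caractere normalizado
--
-- def reduce2radical(word):
--     # elimina os acentos
--     word = normalize('NFKD', word).encode('ASCII', 'ignore').decode('ASCII')
--
--     # elimina letras repetidas mais de 2 vezes na palavra
--     lastChar = ''
--     reduced = ""
--     count = 0
--     for char in list(word):
--         if char == lastChar and count < 2:
--             count += 1
--         elif char != lastChar:
--             count = 0
--         if not (char == lastChar and count == 2):
--             reduced += char
--         lastChar = char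
--
--     # elimina palavras que contenham qualquer caractere que nao esteja no [a-z]
--     for char in list(reduced):
--         if ord(char) not in range(ord('a'),ord('z')+1):
--             reduced = ""
--             break
--
--     return reduced
-- ===== SOURCE B (Python) =====
-- from itertools import groupby
-- from unicodedata import normalize
--
-- def reduce2radical(word):
--     word = normalize('NFKD', word).encode('ASCII', 'ignore').decode('ASCII')
--     reduced = ''.join(c * min(len(list(g)), 2) for c, g in groupby(word))
--     return reduced if all('a' <= ch <= 'z' for ch in reduced) else ''
-- ===== Notes on version B (the rewrite author's own statement) =====
-- stated objective: idiomatic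
-- what changed: Replaces the rolling lastChar/count state machine with itertools.groupby run grouping (emit each char min(run,2) times) and the mutating validation loop with an all() comprehension.
import Mathlib
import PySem

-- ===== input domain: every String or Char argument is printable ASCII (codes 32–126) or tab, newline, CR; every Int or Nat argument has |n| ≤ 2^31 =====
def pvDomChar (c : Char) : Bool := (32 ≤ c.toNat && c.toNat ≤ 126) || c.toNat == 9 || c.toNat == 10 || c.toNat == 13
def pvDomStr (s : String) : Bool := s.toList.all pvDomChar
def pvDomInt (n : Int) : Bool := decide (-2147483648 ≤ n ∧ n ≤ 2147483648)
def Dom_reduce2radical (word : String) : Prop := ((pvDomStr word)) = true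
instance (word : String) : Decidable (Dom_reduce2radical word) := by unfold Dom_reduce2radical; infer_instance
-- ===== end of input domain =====

-- B replaces A's rolling lastChar/count state machine by run grouping (groupby): idiomatic, same cost.
-- In both ports the NFKD/ASCII normalization step is the identity, which is exact on the ASCII domain Dom.

-- ===== PORT A =====
-- state = (lastChar, reduced, count); lastChar = none models Python's initial '' which equals no char
def stepA (s : Option Char × List Char × Nat) (char : Char) : Option Char × List Char × Nat :=
  let lastChar := s.1
  let count := if some char = lastChar ∧ s.2.2 < 2 then s.2.2 + 1
               else if some char ≠ lastChar then 0 else s.2.2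
  let reduced := if ¬(some char = lastChar ∧ count = 2) then s.2.1 ++ [char] else s.2.1
  (some char, reduced, count)

def reduce2radical (word : String) : String :=
  -- word = normalize('NFKD', word).encode('ASCII','ignore').decode('ASCII'): identity on Dom (ASCII input)
  let s := word.toList.foldl stepA (none, [], 0)
  -- second loop: blank reduced if any character is outside [a-z]
  if s.2.1.any (fun c => !(97 ≤ c.toNat && c.toNat ≤ 122)) then "" else String.ofList s.2.1

-- ===== PORT B =====
-- groupby: the runs of equal adjacent characters, as (char, run length)
def runsB : List Char → List (Char × Nat)
  | [] => []
  | c :: rest =>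
      (c, (rest.takeWhile (· == c)).length + 1) :: runsB (rest.dropWhile (· == c))
termination_by l => l.length
decreasing_by
  simp only [List.length_cons]
  exact Nat.lt_succ_of_le (List.length_dropWhile_le _ _)

def reduce2radical_alt (word : String) : String :=
  -- normalization step: identity on Dom (ASCII input)
  let reduced := (runsB word.toList).flatMap (fun p => List.replicate (min p.2 2) p.1)
  if reduced.all (fun ch => decide ('a' ≤ ch) && decide (ch ≤ 'z')) then String.ofList reduced else ""

-- ===== PRECONDITION & SPEC =====
def Spec_reduce2radical (word : String) (out : String) : Prop := out = reduce2radical_alt word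
instance (word : String) (out : String) : Decidable (Spec_reduce2radical word out) := by unfold Spec_reduce2radical; infer_instance

-- ===== CLAIM (what is proved, stated in full; the proofs are below) =====
def Claim_equal_reduce2radical : Prop := ∀ (word : String), Dom_reduce2radical word → Spec_reduce2radical word (reduce2radical word)

-- ===== LEMMAS AND PROOFS =====

-- once count = 2 on the same char, further copies change nothing
theorem stepA_absorb (c : Char) (acc : List Char) (k : Nat) :
    (List.replicate k c).foldl stepA (some c, acc, 2) = (some c, acc, 2) := by
  induction k with
  | zero => rfl
  | succ n ih => simpa [List.replicate_succ, List.foldl_cons, stepA] using ih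

theorem stepA_from1 (c : Char) (acc : List Char) (k : Nat) :
    (List.replicate k c).foldl stepA (some c, acc, 1) = (some c, acc, min (k + 1) 2) := by
  cases k with
  | zero => rfl
  | succ n =>
      have h2 : min (n + 1 + 1) 2 = 2 := by omega
      simpa [List.replicate_succ, List.foldl_cons, stepA, h2] using stepA_absorb c acc n

theorem stepA_from0 (c : Char) (acc : List Char) (k : Nat) :
    (List.replicate k c).foldl stepA (some c, acc, 0) =
      (some c, acc ++ List.replicate (min k 1) c, min k 2) := by
  cases k with
  | zero => simp
  | succ n =>
      have h1 : min (n + 1) 1 = 1 := by omega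
      simpa [List.replicate_succ, List.foldl_cons, stepA, h1] using stepA_from1 c (acc ++ [c]) n

-- processing a whole fresh run of k+1 copies of c
theorem stepA_run (c : Char) (last : Option Char) (acc : List Char) (cnt k : Nat)
    (h : some c ≠ last) :
    (List.replicate (k + 1) c).foldl stepA (last, acc, cnt) =
      (some c, acc ++ List.replicate (min (k + 1) 2) c, min k 2) := by
  have step1 : stepA (last, acc, cnt) c = (some c, acc ++ [c], 0) := by
    simp [stepA, h]
  rw [List.replicate_succ, List.foldl_cons, step1, stepA_from0]
  congr 1
  · rw [List.append_assoc]
    congr 1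
    cases k with
    | zero => simp
    | succ n =>
        have h1 : min (n + 1) 1 = 1 := by omega
        have h2 : min (n + 1 + 1) 2 = 2 := by omega
        rw [h1, h2]
        rfl

theorem takeWhile_eq_replicate (c : Char) (l : List Char) :
    l.takeWhile (· == c) = List.replicate (l.takeWhile (· == c)).length c := by
  rw [List.eq_replicate_iff]
  refine ⟨rfl, fun b hb => ?_⟩
  have := List.mem_takeWhile_imp hb
  simpa [beq_iff_eq] using this

theorem head?_dropWhile_ne (c : Char) (l : List Char) (x : Char)
    (hx : (l.dropWhile (· == c)).head? = some x) : x ≠ c := by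
  have := List.head?_dropWhile_not (p := (· == c)) (l := l)
  rw [hx] at this
  simpa [beq_iff_eq] using this

-- main invariant: folding A's state machine from a fresh state emits each run capped at 2
theorem foldl_stepA_runs (n : Nat) (l : List Char) (hn : l.length ≤ n)
    (last : Option Char) (acc : List Char) (cnt : Nat)
    (hfresh : ∀ x, l.head? = some x → some x ≠ last) :
    (l.foldl stepA (last, acc, cnt)).2.1 =
      acc ++ (runsB l).flatMap (fun p => List.replicate (min p.2 2) p.1) := by
  induction n generalizing l last acc cnt with
  | zero =>
      have : l = [] := List.eq_nil_of_length_eq_zero (Nat.le_zero.mp hn)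
      subst this; simp [runsB]
  | succ m ih =>
      cases l with
      | nil => simp [runsB]
      | cons c rest =>
          have hdecomp : c :: rest =
              List.replicate ((rest.takeWhile (· == c)).length + 1) c ++ rest.dropWhile (· == c) := by
            conv_lhs => rw [← List.takeWhile_append_dropWhile (p := (· == c)) (l := rest)]
            rw [List.replicate_succ, List.cons_append]
            congr 1
            conv_lhs => rw [takeWhile_eq_replicate c rest]
          have hlast : some c ≠ last := hfresh c rfl
          have hlen : (rest.dropWhile (· == c)).length ≤ m := by
            have := List.length_dropWhile_le (· == c) rest
            simpa using Nat.le_trans this (Nat.le_of_succ_le_succ (by simpa using hn))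
          conv_lhs => rw [hdecomp]
          rw [List.foldl_append, stepA_run c last acc cnt _ hlast]
          rw [ih _ hlen (some c) _ _ (fun x hx => by
            simpa using (head?_dropWhile_ne c rest x hx))]
          simp only [runsB, List.flatMap_cons, List.append_assoc]

theorem reduced_eq (l : List Char) :
    (l.foldl stepA (none, [], 0)).2.1 =
      (runsB l).flatMap (fun p => List.replicate (min p.2 2) p.1) := by
  simpa using foldl_stepA_runs l.length l le_rfl none [] 0 (by intro x _; simp)

theorem valid_char_iff (c : Char) :
    (97 ≤ c.toNat && c.toNat ≤ 122) = (decide ('a' ≤ c) && decide (c ≤ 'z')) := by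
  have h1 : ('a' ≤ c) ↔ 97 ≤ c.toNat := by
    rw [Char.le_def]; exact UInt32.le_iff_toNat_le.trans Iff.rfl
  have h2 : (c ≤ 'z') ↔ c.toNat ≤ 122 := by
    rw [Char.le_def]; exact UInt32.le_iff_toNat_le.trans Iff.rfl
  by_cases ha : 97 ≤ c.toNat <;> by_cases hb : c.toNat ≤ 122 <;>
    simp [ha, hb, h1, h2]

theorem any_bad (r : List Char) :
    (r.any (fun c => !(97 ≤ c.toNat && c.toNat ≤ 122))) =
      !(r.all (fun ch => decide ('a' ≤ ch) && decide (ch ≤ 'z'))) := by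
  induction r with
  | nil => rfl
  | cons c t ih =>
      rw [List.any_cons, List.all_cons, ih, valid_char_iff]
      cases (decide ('a' ≤ c) && decide (c ≤ 'z')) <;> simp

-- ===== VERDICT (by name: the statement is the Claim_ definition above) =====
theorem reduce2radical_spec : Claim_equal_reduce2radical := by
  intro word _
  show (if ((word.toList.foldl stepA (none, [], 0)).2.1.any
          (fun c => !(97 ≤ c.toNat && c.toNat ≤ 122))) = true then ""
        else String.ofList (word.toList.foldl stepA (none, [], 0)).2.1) = reduce2radical_alt word
  unfold reduce2radical_alt
  rw [reduced_eq]
  set r := (runsB word.toList).flatMap (fun p => List.replicate (min p.2 2) p.1) with hr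
  rw [any_bad r]
  cases h : r.all (fun ch => decide ('a' ≤ ch) && decide (ch ≤ 'z')) <;> simp [h]
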